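-- pv_equiv track=rewrite | github.com/lopezpdvn/CtCI-6th-Edition-Python | Chapter17/23_brute_force.py | f
-- ===== SOURCE A (Python) =====
-- def f(A):
--   if not A: return None
--
--   for size in range(len(A), 0, -1):
--     x = get_bordered(A, size, 0)
--     if x is None: continue
--     row, col = x
--     return [row[col : col + size]
--             for row in A[row : row + size]]
--
--   return None
--
-- def get_bordered(A, size, value):
--   n_subms = len(A) - size + 1
--
--   for i in range(n_subms):
--     for j in range(n_subms):
--       if is_bordered(A, i, j, size, value):
--         return i, j
--
--   return None
--
-- def is_bordered(A, i, j, size, val):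
--   for offset in range(size):
--     if (   A[i + offset  ][j           ] != val
--         or A[i + offset  ][j + size - 1] != val
--         or A[i           ][j + offset  ] != val
--         or A[i + size - 1][j + offset  ] != val):
--       return False
--
--   return True
-- ===== SOURCE B (Python) =====
-- def f(A):
--   if not A: return None
--   n = len(A)
--   # right[i][j] = length of the run of zeros starting at (i, j) going right (first n columns)
--   right = []
--   for row in A:
--     runs = [0] * n
--     r = 0
--     for j in range(n - 1, -1, -1):
--       r = r + 1 if row[j] == 0 else 0
--       runs[j] = r
--     right.append(runs)
--   # down[i][j] = length of the run of zeros starting at (i, j) going down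
--   down = []
--   below = [0] * n
--   for row in reversed(A):
--     cur = [below[j] + 1 if row[j] == 0 else 0 for j in range(n)]
--     down.append(cur)
--     below = cur
--   down.reverse()
--   for size in range(n, 0, -1):
--     for i in range(n - size + 1):
--       for j in range(n - size + 1):
--         if (right[i][j] >= size and right[i + size - 1][j] >= size
--             and down[i][j] >= size and down[i][j + size - 1] >= size):
--           return [row[j:j + size] for row in A[i:i + size]]
--   return None
-- ===== Notes on version B (the rewrite author's own statement) =====
-- stated objective: faster
-- what changed: Replaces A's O(size) re-scan of each candidate square's border by two precomputed zero-run tables (consecutive zeros rightwards and downwards), so each border test becomes four O(1) table lookups in the same size/row/column search order; Pre_ excludes ragged inputs with a row shorter than the number of rows, on which A usually raises IndexError but can occasionally return by short-circuiting, while B's table construction always raises there.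
-- outside the precondition, e.g. on f([[0, 0, 0], [0, 0, 0], [7]]): A returns [[0, 0], [0, 0]], B raises IndexError
import Mathlib
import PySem

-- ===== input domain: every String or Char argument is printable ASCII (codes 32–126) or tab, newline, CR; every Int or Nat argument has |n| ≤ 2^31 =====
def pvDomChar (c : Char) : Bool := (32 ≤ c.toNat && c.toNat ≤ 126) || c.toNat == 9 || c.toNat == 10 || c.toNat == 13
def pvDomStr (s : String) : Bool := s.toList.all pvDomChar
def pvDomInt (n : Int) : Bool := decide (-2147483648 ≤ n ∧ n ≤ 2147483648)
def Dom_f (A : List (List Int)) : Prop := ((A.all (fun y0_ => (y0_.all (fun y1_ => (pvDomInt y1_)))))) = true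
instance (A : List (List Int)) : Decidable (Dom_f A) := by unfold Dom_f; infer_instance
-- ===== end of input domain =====

-- B replaces A's O(size) border re-scan by two precomputed zero-run tables (right/down),
-- making each candidate square an O(1) check: an asymptotically faster exact algorithm.

-- ===== PORT A =====
-- A[i][j] for the in-range indices admitted by Pre_f (Python raises out of range; Pre_f excludes that)
def pyIdx (A : List (List Int)) (i j : Nat) : Int := (A.getD i []).getD j 0

def isBordered (A : List (List Int)) (i j size : Nat) (val : Int) : Bool :=
  (List.range size).all fun off =>
    decide (pyIdx A (i + off) j = val) && decide (pyIdx A (i + off) (j + size - 1) = val) &&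
    decide (pyIdx A i (j + off) = val) && decide (pyIdx A (i + size - 1) (j + off) = val)

def getBordered (A : List (List Int)) (size : Nat) (val : Int) : Option (Nat × Nat) :=
  let n_subms := A.length - size + 1
  (List.range n_subms).findSome? fun i =>
    (List.range n_subms).findSome? fun j =>
      if isBordered A i j size val then some (i, j) else none

-- range(len(A), 0, -1) rendered as the descending list [n, n-1, …, 1]
def f (A : List (List Int)) : Option (List (List Int)) :=
  if A = [] then none else
    ((List.range A.length).map fun k => A.length - k).findSome? fun size =>
      match getBordered A size 0 with
      | some (r, c) => some (((A.drop r).take size).map fun row => (row.drop c).take size)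
      | none => none

-- ===== PORT B =====
-- Source B's per-row right-to-left run scan (r carried along) as a foldr
def rowRuns (l : List Int) : List Nat :=
  l.foldr (fun a acc => (if a = 0 then acc.headD 0 + 1 else 0) :: acc) []

-- Source B's bottom-up column-run scan: each row of downT is built from the row below it
def downT (A : List (List Int)) (n : Nat) : List (List Nat) :=
  A.foldr (fun row acc =>
    ((List.range n).map fun j =>
      if row.getD j 0 = 0 then (acc.headD (List.replicate n 0)).getD j 0 + 1 else 0) :: acc) []

def tget (t : List (List Nat)) (i j : Nat) : Nat := (t.getD i []).getD j 0

def f_alt (A : List (List Int)) : Option (List (List Int)) :=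
  if A = [] then none else
    let n := A.length
    let right := A.map fun row => rowRuns (row.take n)
    let down := downT A n
    ((List.range n).map fun k => n - k).findSome? fun size =>
      (List.range (n - size + 1)).findSome? fun i =>
        (List.range (n - size + 1)).findSome? fun j =>
          if size ≤ tget right i j ∧ size ≤ tget right (i + size - 1) j ∧
             size ≤ tget down i j ∧ size ≤ tget down i (j + size - 1)
          then some (((A.drop i).take size).map fun row => (row.drop j).take size)
          else none

-- ===== PRECONDITION & SPEC =====
-- Pre_f excludes ragged inputs with a row shorter than the number of rows: there A's short-circuiting
-- border scan usually raises IndexError (and occasionally returns), while B's run-table construction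
-- always raises IndexError.
def Pre_f (A : List (List Int)) : Prop := ∀ r ∈ A, A.length ≤ r.length
instance (A : List (List Int)) : Decidable (Pre_f A) := by unfold Pre_f; infer_instance
def pvWitness_f : List (List Int) := [[0, 1], [1, 0]]

def Spec_f (A : List (List Int)) (out : Option (List (List Int))) : Prop := out = f_alt A
instance (A : List (List Int)) (out : Option (List (List Int))) : Decidable (Spec_f A out) := by unfold Spec_f; infer_instance

-- ===== CLAIM (what is proved, stated in full; the proofs are below) =====
def Claim_equal_f : Prop := ∀ (A : List (List Int)), Dom_f A → Pre_f A → Spec_f A (f A)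

-- ===== LEMMAS AND PROOFS =====

theorem findSome?_congr' {α β : Type} (l : List α) (p q : α → Option β)
    (h : ∀ x ∈ l, p x = q x) : l.findSome? p = l.findSome? q := by
  induction l with
  | nil => rfl
  | cons a t ih =>
    simp only [List.findSome?_cons, h a (by simp)]
    cases q a with
    | none => exact ih fun x hx => h x (by simp [hx])
    | some b => rfl

theorem map_findSome?' {α β γ : Type} (l : List α) (p : α → Option β) (g : β → γ) :
    (l.findSome? p).map g = l.findSome? fun x => (p x).map g := by
  induction l with
  | nil => rfl
  | cons a t ih =>
    simp only [List.findSome?_cons]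
    cases p a with
    | none => simpa using ih
    | some b => rfl

theorem rowRuns_cons (a : Int) (t : List Int) :
    rowRuns (a :: t) = (if a = 0 then (rowRuns t).headD 0 + 1 else 0) :: rowRuns t := by
  simp [rowRuns]

theorem headD_eq_getD {α : Type} (l : List α) (d : α) : l.headD d = l.getD 0 d := by
  cases l <;> rfl

theorem rowRuns_ge (l : List Int) (j s : Nat) :
    s ≤ (rowRuns l).getD j 0 ↔ ∀ k < s, j + k < l.length ∧ l.getD (j + k) 0 = 0 := by
  induction l generalizing j s with
  | nil =>
    simp only [rowRuns, List.foldr_nil, List.getD_nil, List.length_nil]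
    constructor
    · intro h k hk; omega
    · intro h; by_contra hs
      have := (h 0 (by omega)).1; omega
  | cons a t ih =>
    cases j with
    | zero =>
      rw [rowRuns_cons, List.getD_cons_zero, headD_eq_getD]
      by_cases ha : a = 0
      · rw [if_pos ha]
        cases s with
        | zero => simp
        | succ s' =>
          rw [Nat.succ_le_succ_iff, ih 0 s']
          constructor
          · intro h k hk
            cases k with
            | zero => exact ⟨by simp, by simpa using ha⟩
            | succ k' =>
              have := h k' (by omega)
              refine ⟨by simpa using this.1, ?_⟩
              simpa using this.2
          · intro h k hk
            have := h (k + 1) (by omega)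
            refine ⟨by simpa using this.1, ?_⟩
            simpa using this.2
      · rw [if_neg ha]
        constructor
        · intro h k hk; omega
        · intro h; by_contra hs
          have := (h 0 (by omega)).2
          simp at this; exact ha this
    | succ j' =>
      rw [rowRuns_cons, List.getD_cons_succ, ih j' s]
      constructor
      · intro h k hk
        have := h k hk
        have e : j' + 1 + k = (j' + k) + 1 := by omega
        rw [e]
        exact ⟨by simp only [List.length_cons]; omega, by simpa using this.2⟩
      · intro h k hk
        have := h k hk
        have e : j' + 1 + k = (j' + k) + 1 := by omega
        rw [e] at this
        exact ⟨by simpa using this.1, by simpa using this.2⟩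

theorem downT_cons (r : List Int) (A : List (List Int)) (n : Nat) :
    downT (r :: A) n =
      ((List.range n).map fun j =>
        if r.getD j 0 = 0 then ((downT A n).headD (List.replicate n 0)).getD j 0 + 1 else 0)
      :: downT A n := by
  simp [downT]

theorem getD_map_range {β : Type} (n j : Nat) (g : Nat → β) (d : β) (h : j < n) :
    ((List.range n).map g).getD j d = g j := by
  rw [List.getD_eq_getElem?_getD, List.getElem?_map, List.getElem?_range h]
  rfl

theorem headD_downT (A : List (List Int)) (n j : Nat) :
    ((downT A n).headD (List.replicate n 0)).getD j 0 = tget (downT A n) 0 j := by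
  cases h : downT A n with
  | nil => simp [tget]
  | cons x xs => simp [tget]

theorem downT_ge (A : List (List Int)) (n i j s : Nat) (hj : j < n) :
    s ≤ tget (downT A n) i j ↔
      ∀ k < s, i + k < A.length ∧ (A.getD (i + k) []).getD j 0 = 0 := by
  induction A generalizing i s with
  | nil =>
    simp only [downT, List.foldr_nil, tget, List.getD_nil, List.length_nil]
    constructor
    · intro h k hk; omega
    · intro h; by_contra hs
      have := (h 0 (by omega)).1; omega
  | cons r A ih =>
    cases i with
    | zero =>
      rw [downT_cons]
      simp only [tget]
      rw [List.getD_cons_zero, getD_map_range n j _ 0 hj, headD_downT]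
      by_cases hr : r.getD j 0 = 0
      · rw [if_pos hr]
        cases s with
        | zero => simp
        | succ s' =>
          rw [Nat.succ_le_succ_iff, ih 0 s']
          constructor
          · intro h k hk
            cases k with
            | zero => exact ⟨by simp, by simpa using hr⟩
            | succ k' =>
              have := h k' (by omega)
              exact ⟨by simp only [List.length_cons]; omega, by simpa using this.2⟩
          · intro h k hk
            have := h (k + 1) (by omega)
            exact ⟨by simpa using this.1, by simpa using this.2⟩
      · rw [if_neg hr]
        constructor
        · intro h k hk; omega
        · intro h; by_contra hs
          have := (h 0 (by omega)).2
          simp at this; exact hr this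
    | succ i' =>
      rw [downT_cons]
      simp only [tget]
      rw [List.getD_cons_succ]
      rw [show ((downT A n).getD i' []).getD j 0 = tget (downT A n) i' j from rfl, ih i' s]
      constructor
      · intro h k hk
        have := h k hk
        have e : i' + 1 + k = (i' + k) + 1 := by omega
        rw [e]
        exact ⟨by simp only [List.length_cons]; omega, by simpa using this.2⟩
      · intro h k hk
        have := h k hk
        have e : i' + 1 + k = (i' + k) + 1 := by omega
        rw [e] at this
        exact ⟨by simpa using this.1, by simpa using this.2⟩

theorem getD_map_rows (A : List (List Int)) (g : List Int → List Nat) (i : Nat) (h : i < A.length) :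
    (A.map g).getD i [] = g (A.getD i []) := by
  rw [List.getD_eq_getElem?_getD, List.getD_eq_getElem?_getD, List.getElem?_map,
      List.getElem?_eq_getElem h]
  rfl

theorem getD_mem (A : List (List Int)) (i : Nat) (h : i < A.length) : A.getD i [] ∈ A := by
  rw [List.getD_eq_getElem?_getD, List.getElem?_eq_getElem h]
  exact List.getElem_mem h

theorem getD_take (l : List Int) (n j : Nat) (h : j < n) : (l.take n).getD j 0 = l.getD j 0 := by
  simp [List.getD_eq_getElem?_getD, h]

theorem right_ge (A : List (List Int)) (hpre : ∀ r ∈ A, A.length ≤ r.length)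
    (i j size : Nat) (hi : i < A.length) (hj : j + size ≤ A.length) :
    size ≤ tget (A.map fun row => rowRuns (row.take A.length)) i j ↔
      ∀ k < size, pyIdx A i (j + k) = 0 := by
  have hlen : A.length ≤ (A.getD i []).length := hpre _ (getD_mem A i hi)
  rw [tget, getD_map_rows A _ i hi, rowRuns_ge]
  constructor
  · intro h k hk
    have := (h k hk).2
    rwa [getD_take _ _ _ (by omega)] at this
  · intro h k hk
    refine ⟨?_, ?_⟩
    · rw [List.length_take]; omega
    · rw [getD_take _ _ _ (by omega)]
      exact h k hk

theorem down_ge (A : List (List Int)) (i j size : Nat)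
    (hj : j < A.length) (hi : i + size ≤ A.length) :
    size ≤ tget (downT A A.length) i j ↔ ∀ k < size, pyIdx A (i + k) j = 0 := by
  rw [downT_ge A A.length i j size hj]
  constructor
  · intro h k hk; exact (h k hk).2
  · intro h k hk; exact ⟨by omega, h k hk⟩

theorem cond_iff (A : List (List Int)) (hpre : ∀ r ∈ A, A.length ≤ r.length) (size i j : Nat)
    (hs : 1 ≤ size) (hi : i + size ≤ A.length) (hj : j + size ≤ A.length) :
    isBordered A i j size 0 = true ↔
      (size ≤ tget (A.map fun row => rowRuns (row.take A.length)) i j ∧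
       size ≤ tget (A.map fun row => rowRuns (row.take A.length)) (i + size - 1) j ∧
       size ≤ tget (downT A A.length) i j ∧
       size ≤ tget (downT A A.length) i (j + size - 1)) := by
  rw [right_ge A hpre i j size (by omega) hj,
      right_ge A hpre (i + size - 1) j size (by omega) hj,
      down_ge A i j size (by omega) hi,
      down_ge A i (j + size - 1) size (by omega) hi]
  simp only [isBordered, List.all_eq_true, List.mem_range, Bool.and_eq_true, decide_eq_true_eq]
  constructor
  · intro h
    exact ⟨fun k hk => (h k hk).1.2, fun k hk => (h k hk).2,
           fun k hk => (h k hk).1.1.1, fun k hk => (h k hk).1.1.2⟩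
  · rintro ⟨h3, h4, h1, h2⟩ off hoff
    exact ⟨⟨⟨h1 off hoff, h2 off hoff⟩, h3 off hoff⟩, h4 off hoff⟩


-- ===== VERDICT (by name: the statement is the Claim_ definition above) =====
theorem f_spec : Claim_equal_f := by
  intro A _ hpre
  unfold Spec_f
  by_cases hA : A = []
  · simp [f, f_alt, hA]
  · simp only [f, f_alt, if_neg hA]
    apply findSome?_congr'
    intro size hsize
    have hsz : 1 ≤ size ∧ size ≤ A.length := by
      simp only [List.mem_map, List.mem_range] at hsize
      obtain ⟨k, hk, rfl⟩ := hsize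
      omega
    have hlhs : (match getBordered A size 0 with
        | some (r, c) => some (((A.drop r).take size).map fun row => (row.drop c).take size)
        | none => none)
      = (getBordered A size 0).map fun rc =>
          ((A.drop rc.1).take size).map fun row => (row.drop rc.2).take size := by
      rcases getBordered A size 0 with _ | ⟨r, c⟩ <;> rfl
    rw [hlhs]
    simp only [getBordered]
    rw [map_findSome?']
    apply findSome?_congr'
    intro i hi
    rw [map_findSome?']
    apply findSome?_congr'
    intro j hj
    simp only [List.mem_range] at hi hj
    have hib : i + size ≤ A.length := by omega
    have hjb : j + size ≤ A.length := by omega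
    by_cases hc : (size ≤ tget (A.map fun row => rowRuns (row.take A.length)) i j ∧
        size ≤ tget (A.map fun row => rowRuns (row.take A.length)) (i + size - 1) j ∧
        size ≤ tget (downT A A.length) i j ∧
        size ≤ tget (downT A A.length) i (j + size - 1))
    · rw [if_pos ((cond_iff A hpre size i j hsz.1 hib hjb).mpr hc), if_pos hc]
      rfl
    · rw [if_neg (fun h => hc ((cond_iff A hpre size i j hsz.1 hib hjb).mp h)), if_neg hc]
      rfl
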